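-- pv_equiv track=rewrite | github.com/Valereon/Maxwell-Compression | experiments/genetic/deltaOptimizedUnpacker.py | uncap_deltas
-- ===== SOURCE A (Python) =====
-- def uncap_deltas(capped_deltas, max_delta):
--     """Reverse the capping operation - FIXED TO HANDLE NEGATIVE DELTAS"""
--     result = []
--     current_accumulator = 0
--
--     for delta in capped_deltas:
--         current_accumulator += delta
--         if abs(delta) < max_delta:  # Check absolute value
--             result.append(current_accumulator)
--             current_accumulator = 0
--
--     # Handle case where sequence ends with max_delta values
--     if current_accumulator != 0:
--         result.append(current_accumulator)
--
--     return result
-- ===== SOURCE B (Python) =====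
-- def uncap_deltas(capped_deltas, max_delta):
--     """Reverse the capping operation via prefix sums: record the running
--     prefix-sum value at each sub-max boundary, output the adjacent
--     differences of those cut values, and append the remainder after the
--     last cut only if it is nonzero."""
--     run = 0
--     cuts = []  # prefix-sum value at each sub-max boundary
--     for d in capped_deltas:
--         run += d
--         if abs(d) < max_delta:
--             cuts.append(run)
--     result = [b - a for a, b in zip([0] + cuts, cuts)]
--     last = cuts[-1] if cuts else 0
--     if run != last:
--         result.append(run - last)
--     return result
-- ===== Notes on version B (the rewrite author's own statement) =====
-- stated objective: alternative
-- what changed: Replaces A's emit-as-you-go accumulator loop by a prefix-sum decomposition: one pass records the running prefix-sum at each sub-max boundary, the output is the list of adjacent differences of those cut values, with the post-last-cut remainder appended only when nonzero.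
import Mathlib
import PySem

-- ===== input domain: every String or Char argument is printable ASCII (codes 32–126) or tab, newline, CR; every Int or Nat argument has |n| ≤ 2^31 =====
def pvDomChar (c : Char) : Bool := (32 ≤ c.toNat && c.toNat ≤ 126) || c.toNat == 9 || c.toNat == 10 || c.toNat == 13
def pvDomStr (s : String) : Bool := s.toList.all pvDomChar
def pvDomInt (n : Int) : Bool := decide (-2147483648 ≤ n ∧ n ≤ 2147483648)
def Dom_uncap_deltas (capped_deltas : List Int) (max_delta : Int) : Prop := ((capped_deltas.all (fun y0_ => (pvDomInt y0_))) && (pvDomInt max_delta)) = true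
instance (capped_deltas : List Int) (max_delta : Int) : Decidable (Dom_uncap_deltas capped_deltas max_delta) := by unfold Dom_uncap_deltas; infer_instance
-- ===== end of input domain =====

-- B replaces A's emit-as-you-go accumulator loop by a prefix-sum decomposition
-- (cut values at boundaries, adjacent differences, nonzero tail guard): alternative, same O(n) cost.


-- ===== PORT A =====
-- literal port of A: one fold carrying (result, current_accumulator), then the trailing guard
def uncap_deltas (capped_deltas : List Int) (max_delta : Int) : List Int :=
  let p := capped_deltas.foldl
    (fun (p : List Int × Int) delta =>
      let acc := p.2 + delta
      if |delta| < max_delta then (p.1 ++ [acc], (0 : Int)) else (p.1, acc))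
    ([], 0)
  if p.2 ≠ 0 then p.1 ++ [p.2] else p.1

-- ===== PORT B =====
-- literal port of B: fold collecting (run, cuts) where cuts are the running
-- prefix-sum values at sub-max boundaries; result = adjacent differences of
-- zip([0]+cuts, cuts) (Lean's List.zip truncates exactly like Python's zip);
-- cuts[-1] on a possibly empty list is ported as getLast?.getD of the 'else 0' branch
def uncap_deltas_alt (capped_deltas : List Int) (max_delta : Int) : List Int :=
  let p := capped_deltas.foldl
    (fun (p : Int × List Int) d =>
      let run := p.1 + d
      if |d| < max_delta then (run, p.2 ++ [run]) else (run, p.2))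
    (0, [])
  let run := p.1
  let cuts := p.2
  let result := (((0 :: cuts).zip cuts).map (fun ab => ab.2 - ab.1))
  let last := cuts.getLast?.getD 0
  if run ≠ last then result ++ [run - last] else result

-- ===== PRECONDITION & SPEC =====
def Spec_uncap_deltas (capped_deltas : List Int) (max_delta : Int) (out : List Int) : Prop := out = uncap_deltas_alt capped_deltas max_delta
instance (capped_deltas : List Int) (max_delta : Int) (out : List Int) : Decidable (Spec_uncap_deltas capped_deltas max_delta out) := by unfold Spec_uncap_deltas; infer_instance

-- ===== CLAIM (what is proved, stated in full; the proofs are below) =====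
def Claim_equal_uncap_deltas : Prop := ∀ (capped_deltas : List Int) (max_delta : Int), Dom_uncap_deltas capped_deltas max_delta → Spec_uncap_deltas capped_deltas max_delta (uncap_deltas capped_deltas max_delta)

-- ===== LEMMAS AND PROOFS =====

-- common recursive characterisation of both programs
def segSpec (m : Int) (acc : Int) : List Int → List Int
  | [] => if acc ≠ 0 then [acc] else []
  | d :: xs => if |d| < m then (acc + d) :: segSpec m 0 xs else segSpec m (acc + d) xs

-- prefix-sum values at the boundaries of xs (relative to the start of xs)
def cutsOf (m : Int) : List Int → List Int
  | [] => []
  | d :: xs => if |d| < m then d :: (cutsOf m xs).map (d + ·) else (cutsOf m xs).map (d + ·)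

-- emit acc prev cs total: adjacent differences of cs with previous cut prev
-- (the first difference also carries acc), then the tail total - lastcut if nonzero
def emit (acc prev : Int) (cs : List Int) (total : Int) : List Int :=
  match cs with
  | [] => if acc + (total - prev) ≠ 0 then [acc + (total - prev)] else []
  | c :: cs' => (acc + (c - prev)) :: emit 0 c cs' total

theorem a_loop_eq_segSpec (m : Int) :
    ∀ (xs : List Int) (res : List Int) (acc : Int),
      (let p := xs.foldl
          (fun (p : List Int × Int) delta =>
            let a := p.2 + delta
            if |delta| < m then (p.1 ++ [a], (0 : Int)) else (p.1, a))
          (res, acc)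
       if p.2 ≠ 0 then p.1 ++ [p.2] else p.1) = res ++ segSpec m acc xs := by
  intro xs
  induction xs with
  | nil =>
      intro res acc
      simp only [List.foldl_nil, segSpec]
      split_ifs <;> simp
  | cons d xs ih =>
      intro res acc
      simp only [List.foldl_cons, segSpec]
      by_cases hd : |d| < m
      · simp only [hd, if_true]
        have := ih (res ++ [acc + d]) 0
        simpa [List.append_assoc] using this
      · simp only [hd, if_false]
        exact ih res (acc + d)

theorem a_eq_segSpec (xs : List Int) (m : Int) :
    uncap_deltas xs m = segSpec m 0 xs := by
  have := a_loop_eq_segSpec m xs [] 0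
  simpa [uncap_deltas] using this

-- B's fold computes (sum, cut values shifted by the initial run)
theorem b_fold_spec (m : Int) :
    ∀ (xs : List Int) (r0 : Int) (cs0 : List Int),
      xs.foldl
        (fun (p : Int × List Int) d =>
          let run := p.1 + d
          if |d| < m then (run, p.2 ++ [run]) else (run, p.2))
        (r0, cs0)
      = (r0 + xs.sum, cs0 ++ (cutsOf m xs).map (r0 + ·)) := by
  intro xs
  induction xs with
  | nil => intro r0 cs0; simp [cutsOf]
  | cons d xs ih =>
      intro r0 cs0
      simp only [List.foldl_cons, cutsOf]
      by_cases hd : |d| < m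
      · simp only [hd, if_true]
        rw [ih]
        simp only [Prod.mk.injEq, List.map_cons, List.map_map, List.append_assoc,
          List.singleton_append, List.sum_cons]
        refine ⟨by ring, ?_⟩
        congr 1
        simp only [List.cons.injEq]
        refine ⟨trivial, ?_⟩
        apply List.map_congr_left; intro a _; simp only [Function.comp_apply]; ring
      · simp only [hd, if_false]
        rw [ih]
        simp only [Prod.mk.injEq, List.map_map, List.sum_cons]
        refine ⟨by ring, ?_⟩
        congr 1
        apply List.map_congr_left; intro a _; simp only [Function.comp_apply]; ring

-- emit only depends on acc - 0 and the differences: shifting acc and prev together is invisible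
theorem emit_shift (acc prev d : Int) (cs : List Int) (total : Int) :
    emit acc prev cs total = emit (acc + d) (prev + d) cs total := by
  cases cs with
  | nil => simp only [emit]; have : acc + (total - prev) = acc + d + (total - (prev + d)) := by ring
           rw [this]
  | cons c cs' => simp only [emit]; congr 1; ring

-- the key bridge: emit over shifted cuts is segSpec
theorem emit_eq_segSpec (m : Int) :
    ∀ (xs : List Int) (acc prev : Int),
      emit acc prev ((cutsOf m xs).map (prev + ·)) (prev + xs.sum) = segSpec m acc xs := by
  intro xs
  induction xs with
  | nil => intro acc prev; simp [cutsOf, emit, segSpec]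
  | cons d xs ih =>
      intro acc prev
      simp only [cutsOf, segSpec, List.sum_cons]
      by_cases hd : |d| < m
      · simp only [hd, if_true, List.map_cons, emit, List.map_map]
        congr 1
        · ring
        · have hmap : (cutsOf m xs).map ((prev + ·) ∘ (d + ·))
              = (cutsOf m xs).map ((prev + d) + ·) := by
            apply List.map_congr_left; intro a _; simp [Function.comp]; ring
          rw [hmap]
          have htot : prev + (d + xs.sum) = (prev + d) + xs.sum := by ring
          rw [htot]
          exact ih 0 (prev + d)
      · simp only [hd, if_false, List.map_map]
        have hmap : (cutsOf m xs).map ((prev + ·) ∘ (d + ·))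
            = (cutsOf m xs).map ((prev + d) + ·) := by
          apply List.map_congr_left; intro a _; simp [Function.comp]; ring
        rw [hmap]
        have htot : prev + (d + xs.sum) = (prev + d) + xs.sum := by ring
        rw [htot]
        rw [emit_shift acc prev d]
        exact ih (acc + d) (prev + d)

-- B's assembly (zip differences + guarded tail) is emit 0 z
theorem assemble_eq_emit :
    ∀ (cs : List Int) (z total : Int),
      (if total ≠ cs.getLast?.getD z
        then (((z :: cs).zip cs).map (fun ab => ab.2 - ab.1)) ++ [total - cs.getLast?.getD z]
        else ((z :: cs).zip cs).map (fun ab => ab.2 - ab.1))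
      = emit 0 z cs total := by
  intro cs
  induction cs with
  | nil =>
      intro z total
      simp only [List.zip_nil_right, List.map_nil, List.getLast?_nil, Option.getD_none, emit,
        zero_add, sub_ne_zero, List.nil_append]
  | cons c cs' ih =>
      intro z total
      have hlast : (c :: cs').getLast?.getD z = cs'.getLast?.getD c := by
        cases cs' with
        | nil => rfl
        | cons e es =>
            cases h : (e :: es).getLast? with
            | none => simp [List.getLast?_eq_none_iff] at h
            | some v => simp [h]
      simp only [List.zip_cons_cons, List.map_cons, hlast, emit]
      rw [← ih c total]
      split_ifs <;> simp

theorem b_eq_segSpec (xs : List Int) (m : Int) :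
    uncap_deltas_alt xs m = segSpec m 0 xs := by
  unfold uncap_deltas_alt
  rw [b_fold_spec m xs 0 []]
  simp only [List.nil_append, zero_add, List.map_id']
  rw [assemble_eq_emit (cutsOf m xs) 0 xs.sum]
  have h2 := emit_eq_segSpec m xs 0 0
  simpa using h2

-- ===== VERDICT (by name: the statement is the Claim_ definition above) =====
theorem uncap_deltas_spec : Claim_equal_uncap_deltas := by
  intro xs m _
  unfold Spec_uncap_deltas
  rw [a_eq_segSpec, b_eq_segSpec]
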